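-- pv_equiv track=rewrite | github.com/tasyald/DTL-implementation | c45.py | attribute_table
-- ===== SOURCE A (Python) =====
-- import copy
--
-- def attribute_table(data, target):
--     dataTemp = copy.deepcopy(data)
--     dataTrans = list(zip(*dataTemp))
--
--     attrtarget = {}
--     for row in target:
--         attrtarget[row[0]] = 0
--
--     attrdict = {}
--     for row in dataTrans:
--         attrins = {}
--         for i in range(0, len(row)):
--             if row[i] not in attrins:
--                 attrins[row[i]] = copy.deepcopy(attrtarget)
--             attrins[row[i]][target[i][0]] += 1
--         attrdict[row] = attrins
--
--     return attrdict
-- ===== SOURCE B (Python) =====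
-- def attribute_table(data, target):
--     classes = [row[0] for row in target]
--     distinct_classes = list(dict.fromkeys(classes))
--     result = {}
--     for col in zip(*data):
--         pairs = list(zip(col, classes))
--         values = list(dict.fromkeys(col))
--         result[col] = {v: {c: pairs.count((v, c)) for c in distinct_classes}
--                        for v in values}
--     return result
-- ===== Notes on version B (the rewrite author's own statement) =====
-- stated objective: alternative
-- what changed: B replaces A's single incremental pass (one mutable nested dict per column, a deep-copied zero template inserted and a cell incremented at every row) with a declarative count-based construction: it materializes the (value, class) pair list per column and builds each table cell directly as pairs.count((v, c)) over the deduplicated value and class lists, with no incremental accumulator at all.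
import Mathlib
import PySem

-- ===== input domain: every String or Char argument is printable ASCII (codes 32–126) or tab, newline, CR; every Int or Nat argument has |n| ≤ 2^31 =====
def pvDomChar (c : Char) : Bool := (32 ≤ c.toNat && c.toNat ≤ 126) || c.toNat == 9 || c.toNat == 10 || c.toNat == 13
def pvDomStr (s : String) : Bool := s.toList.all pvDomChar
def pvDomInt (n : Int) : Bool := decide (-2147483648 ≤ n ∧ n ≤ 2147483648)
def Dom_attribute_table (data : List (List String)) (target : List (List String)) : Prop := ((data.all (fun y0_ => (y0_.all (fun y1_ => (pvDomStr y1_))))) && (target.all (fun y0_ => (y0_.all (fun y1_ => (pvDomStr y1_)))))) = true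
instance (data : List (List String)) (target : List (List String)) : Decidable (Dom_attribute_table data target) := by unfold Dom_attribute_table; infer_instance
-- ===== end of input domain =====

-- B builds each per-column table declaratively — every cell is pairs.count((v, c)) over the
-- deduplicated value/class lists — instead of A's incremental pass that deep-copies a zero
-- template and increments one mutable cell per row; equal output on Pre_ (where A does not raise).

-- zip(*rows) for string rows (Python's zip truncates to the shortest row); used by both ports.
def pyZipStar (rows : List (List String)) : List (List String) :=
  match rows with
  | [] => []
  | r :: rs =>
    let n := rs.foldl (fun m t => min m t.length) r.length
    (List.range n).map (fun i => (r :: rs).map (fun t => t.getD i ""))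

-- ===== PORT A =====
-- copy.deepcopy is the identity on these immutable-content values, so dataTemp = data.
-- The nested Python dicts are PySem.Dicts; the final return converts them to item lists
-- (the type convention's encoding of the returned dict-of-dict-of-dicts).
def attribute_table (data : List (List String)) (target : List (List String)) : List (List String × List (String × List (String × Int))) :=
  let dataTrans := pyZipStar data
  let attrtarget : PySem.Dict String Int :=
    target.foldl (fun d row => d.insert (row.headD "") 0) PySem.Dict.empty
  let attrdict : PySem.Dict (List String) (PySem.Dict String (PySem.Dict String Int)) :=
    dataTrans.foldl (fun attrdict row =>
      let attrins :=
        (PySem.List.pyRange 0 row.length 1).foldl (fun attrins i =>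
          let v := PySem.List.pyGetD row i ""
          let cls := (PySem.List.pyGetD target i []).headD ""
          let attrins := if attrins.contains v then attrins else attrins.insert v attrtarget
          -- attrins[v][cls] += 1  (v is present; cls is a key of the attrtarget copy)
          attrins.modify v PySem.Dict.empty (fun d => d.modify cls 0 (· + 1)))
        PySem.Dict.empty
      attrdict.insert row attrins) PySem.Dict.empty
  attrdict.items.map (fun p => (p.1, p.2.items.map (fun q => (q.1, q.2.items))))

-- ===== PORT B =====
-- pairs.count((v, c)) is PySem.List.count; list(dict.fromkeys(..)) is PySem.Set.ofList.
def attribute_table_alt (data : List (List String)) (target : List (List String)) : List (List String × List (String × List (String × Int))) :=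
  let classes := target.map (fun r => r.headD "")
  let distinctClasses := PySem.Set.ofList classes
  let result : PySem.Dict (List String) (List (String × List (String × Int))) :=
    (pyZipStar data).foldl (fun result col =>
      let pairs := col.zip classes
      let values := PySem.Set.ofList col
      result.insert col (values.map (fun v =>
        (v, distinctClasses.map (fun c => (c, (PySem.List.count pairs (v, c) : Int))))))) PySem.Dict.empty
  result.items

-- ===== PRECONDITION & SPEC =====
-- Pre_ excludes exactly the inputs where Python A raises IndexError: some target row is empty
-- (row[0] in the first loop), or the transpose is nonempty but target has fewer rows than data
-- (target[i][0] in the inner loop).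
def Pre_attribute_table (data : List (List String)) (target : List (List String)) : Prop :=
  (∀ r ∈ target, r ≠ []) ∧ (data = [] ∨ (∃ r ∈ data, r = []) ∨ data.length ≤ target.length)
instance (data : List (List String)) (target : List (List String)) : Decidable (Pre_attribute_table data target) := by unfold Pre_attribute_table; infer_instance

def pvWitness_attribute_table : List (List String) × List (List String) :=
  ([["a", "b"], ["a", "c"]], [["x"], ["y"]])

def Spec_attribute_table (data : List (List String)) (target : List (List String)) (out : List (List String × List (String × List (String × Int)))) : Prop := out = attribute_table_alt data target
instance (data : List (List String)) (target : List (List String)) (out : List (List String × List (String × List (String × Int)))) : Decidable (Spec_attribute_table data target out) := by unfold Spec_attribute_table; infer_instance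

-- ===== CLAIM (what is proved, stated in full; the proofs are below) =====
def Claim_equal_attribute_table : Prop := ∀ (data : List (List String)) (target : List (List String)), Dom_attribute_table data target → Pre_attribute_table data target → Spec_attribute_table data target (attribute_table data target)

-- ===== LEMMAS AND PROOFS =====

-- contains / getD / insert on a dict of the literal shape 'Dict.mk (l.map (fun x => (x, g x)))'
theorem pv_contains_mkmap {κ ν : Type} [BEq κ] [LawfulBEq κ] (l : List κ) (g : κ → ν) (k : κ) :
    (PySem.Dict.mk (l.map (fun x => (x, g x)))).contains k = true ↔ k ∈ l := by
  simp [PySem.Dict.contains, List.any_map, List.any_eq_true, Function.comp]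

theorem pv_getD_mkmap {κ ν : Type} [BEq κ] [LawfulBEq κ] (l : List κ) (g : κ → ν) (k : κ)
    (hk : k ∈ l) (dflt : ν) :
    (PySem.Dict.mk (l.map (fun x => (x, g x)))).getD k dflt = g k := by
  induction l with
  | nil => simp at hk
  | cons c rest ih =>
    simp only [List.map_cons, PySem.Dict.getD_eq_get?_getD, PySem.Dict.get?_mk_cons]
    by_cases hc : (c == k) = true
    · simp_all
    · have : k ∈ rest := by
        rcases List.mem_cons.mp hk with h | h
        · exact absurd (beq_iff_eq.mpr h.symm) hc
        · exact h
      simpa [hc, PySem.Dict.getD_eq_get?_getD] using ih this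

theorem pv_insert_mkmap_mem {κ ν : Type} [BEq κ] [LawfulBEq κ] [DecidableEq κ] (l : List κ) (g : κ → ν) (k : κ)
    (hk : k ∈ l) (v : ν) :
    (PySem.Dict.mk (l.map (fun x => (x, g x)))).insert k v
      = PySem.Dict.mk (l.map (fun x => (x, if x = k then v else g x))) := by
  apply PySem.Dict.ext
  have hc : (PySem.Dict.mk (l.map (fun x => (x, g x)))).contains k = true :=
    (pv_contains_mkmap l g k).mpr hk
  simp only [PySem.Dict.items_insert, hc, if_pos, List.map_map]
  apply List.map_congr_left
  intro x _
  by_cases hx : x = k <;> simp [hx]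

theorem pv_insert_mkmap_fresh {κ ν : Type} [BEq κ] [LawfulBEq κ] (l : List κ) (g g' : κ → ν) (k : κ) (v : ν)
    (hk : k ∉ l) (hg : ∀ x ∈ l, g' x = g x) (hv : g' k = v) :
    (PySem.Dict.mk (l.map (fun x => (x, g x)))).insert k v
      = PySem.Dict.mk ((l ++ [k]).map (fun x => (x, g' x))) := by
  apply PySem.Dict.ext
  have hc : (PySem.Dict.mk (l.map (fun x => (x, g x)))).contains k = false := by
    rw [Bool.eq_false_iff]
    intro h; exact hk ((pv_contains_mkmap l g k).mp h)
  simp only [PySem.Dict.items_insert, hc, Bool.false_eq_true, if_false, List.map_append,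
    List.map_cons, List.map_nil, hv]
  congr 1
  exact (List.map_congr_left (fun x hx => by rw [hg x hx])).symm

-- the declarative table B computes for one column, as a nested Dict
def pvTable (tpl : List String) (pairs : List (String × String)) :
    PySem.Dict String (PySem.Dict String Int) :=
  PySem.Dict.mk ((PySem.Set.ofList (pairs.map Prod.fst)).map (fun v =>
    (v, PySem.Dict.mk (tpl.map (fun c => (c, (pairs.count (v, c) : Int)))))))

theorem pv_count_append (ps : List (String × String)) (p x : String × String) :
    ((ps ++ [p]).count x : Int) = (ps.count x : Int) + (if x = p then 1 else 0) := by
  rw [List.count_append]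
  by_cases h : x = p
  · subst h; simp
  · have : [p].count x = 0 := by
      simp [List.count_eq_zero, h]
    rw [this]; simp [h]

-- one step of A's inner loop applied to the declarative table
theorem pv_step (tpl : List String) (ps : List (String × String)) (p : String × String)
    (hc : p.2 ∈ tpl) :
    ((if (pvTable tpl ps).contains p.1 then pvTable tpl ps
      else (pvTable tpl ps).insert p.1 (PySem.Dict.mk (tpl.map (fun c => (c, (0 : Int)))))).modify
        p.1 PySem.Dict.empty (fun d => d.modify p.2 0 (· + 1)))
    = pvTable tpl (ps ++ [p]) := by
  obtain ⟨v0, c0⟩ := p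
  simp only at hc
  have hmapfst : (ps ++ [(v0, c0)]).map Prod.fst = ps.map Prod.fst ++ [v0] := by simp
  have hS : PySem.Set.ofList ((ps ++ [(v0, c0)]).map Prod.fst)
      = PySem.Set.add (PySem.Set.ofList (ps.map Prod.fst)) v0 := by
    rw [hmapfst, PySem.Set.ofList_append, PySem.Set.update_cons, PySem.Set.update_nil]
  by_cases hv : v0 ∈ PySem.Set.ofList (ps.map Prod.fst)
  · -- value already seen: no template insert; modify replaces v0's row in place
    have hcont : (pvTable tpl ps).contains v0 = true := by
      unfold pvTable; exact (pv_contains_mkmap _ _ v0).mpr hv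
    rw [if_pos hcont]
    unfold pvTable
    rw [PySem.Dict.modify, pv_getD_mkmap _ _ v0 hv]
    have hinner : (PySem.Dict.mk (tpl.map (fun c => (c, (ps.count (v0, c) : Int))))).modify c0 0 (· + 1)
        = PySem.Dict.mk (tpl.map (fun c => (c, ((ps ++ [(v0, c0)]).count (v0, c) : Int)))) := by
      rw [PySem.Dict.modify, pv_getD_mkmap _ _ c0 hc,
        pv_insert_mkmap_mem _ _ c0 hc]
      apply PySem.Dict.ext
      apply List.map_congr_left
      intro c _
      rw [pv_count_append]
      by_cases hcc : c = c0 <;> simp [hcc]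
    rw [hinner, pv_insert_mkmap_mem _ _ v0 hv]
    rw [hS, PySem.Set.add_eq_ite, if_pos (by simpa using hv)]
    congr 1
    apply List.map_congr_left
    intro v _
    by_cases hvv : v = v0
    · simp [hvv]
    · have : ∀ c, ((ps ++ [(v0, c0)]).count (v, c) : Int) = (ps.count (v, c) : Int) := by
        intro c; rw [pv_count_append]; simp [hvv]
      simp only [hvv, if_false]
      exact congrArg (fun d => (v, d))
        (PySem.Dict.ext (List.map_congr_left (fun c _ => by rw [this c])))
  · -- fresh value: insert the zero template, then bump cell c0; counts of ps at v0 are all 0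
    have hcont : (pvTable tpl ps).contains v0 = false := by
      unfold pvTable
      rw [Bool.eq_false_iff]
      intro h; exact hv ((pv_contains_mkmap _ _ v0).mp h)
    rw [if_neg (by simp [hcont])]
    rw [PySem.Dict.modify, PySem.Dict.getD_insert_self, PySem.Dict.insert_insert_self]
    have hzero : ∀ c, (ps.count (v0, c) : Int) = 0 := by
      intro c
      have : (v0, c) ∉ ps := fun hmem => by
        have : v0 ∈ ps.map Prod.fst := List.mem_map.mpr ⟨(v0, c), hmem, rfl⟩
        exact hv ((PySem.Set.mem_ofList _ _).mpr this)
      simp [List.count_eq_zero.mpr this]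
    have hinner : (PySem.Dict.mk (tpl.map (fun c => (c, (0 : Int))))).modify c0 0 (· + 1)
        = PySem.Dict.mk (tpl.map (fun c => (c, ((ps ++ [(v0, c0)]).count (v0, c) : Int)))) := by
      rw [PySem.Dict.modify, pv_getD_mkmap _ _ c0 hc, pv_insert_mkmap_mem _ _ c0 hc]
      apply PySem.Dict.ext
      apply List.map_congr_left
      intro c _
      rw [pv_count_append, hzero c]
      by_cases hcc : c = c0 <;> simp [hcc]
    rw [hinner]
    unfold pvTable
    rw [hS, PySem.Set.add_eq_ite, if_neg (by simpa using hv)]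
    refine pv_insert_mkmap_fresh _ _
      (fun v => PySem.Dict.mk (tpl.map (fun c => (c, ((ps ++ [(v0, c0)]).count (v, c) : Int)))))
      v0 _ hv ?_ rfl
    intro v hvS
    have hvv : v ≠ v0 := fun he => hv (he ▸ hvS)
    apply PySem.Dict.ext
    apply List.map_congr_left
    intro c _
    rw [pv_count_append]
    simp [hvv]

-- A's inner loop over (value, class) pairs computes exactly the declarative table
theorem pv_inner_eq (tpl : List String) (pairs : List (String × String))
    (hp : ∀ p ∈ pairs, p.2 ∈ tpl) :
    pairs.foldl (fun attrins p =>
        (if attrins.contains p.1 then attrins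
         else attrins.insert p.1 (PySem.Dict.mk (tpl.map (fun c => (c, (0 : Int)))))).modify p.1
          PySem.Dict.empty (fun d => d.modify p.2 0 (· + 1))) PySem.Dict.empty
    = pvTable tpl pairs := by
  induction pairs using List.reverseRecOn with
  | nil => rfl
  | append_singleton ps p ih =>
    rw [List.foldl_append, List.foldl_cons, List.foldl_nil,
      ih (fun q hq => hp q (List.mem_append_left _ hq)),
      pv_step tpl ps p (hp p (List.mem_append_right _ List.mem_cons_self))]

theorem pv_contains_mapVal {κ ν ν' : Type} [BEq κ] (f : ν → ν') (d : PySem.Dict κ ν) (k : κ) :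
    (PySem.Dict.mk (d.items.map (fun p => (p.1, f p.2)))).contains k = d.contains k := by
  simp only [PySem.Dict.contains, List.any_map]
  rfl

theorem pv_insert_mapVal {κ ν ν' : Type} [BEq κ] (f : ν → ν') (d : PySem.Dict κ ν) (k : κ) (v : ν) :
    (PySem.Dict.mk (d.items.map (fun p => (p.1, f p.2)))).insert k (f v)
      = PySem.Dict.mk ((d.insert k v).items.map (fun p => (p.1, f p.2))) := by
  apply PySem.Dict.ext
  by_cases h : d.contains k = true
  · simp only [PySem.Dict.items_insert, pv_contains_mapVal, h, if_pos, List.map_map]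
    apply List.map_congr_left
    intro p _
    by_cases hp : (p.1 == k) = true <;> simp [hp]
  · simp only [PySem.Dict.items_insert, pv_contains_mapVal, h]
    simp

-- both outer loops are insert-folds over the same columns; the values correspond under f
theorem pv_outer {κ ν ν' : Type} [BEq κ] (f : ν → ν') (l : List κ) (F : κ → ν) (G : κ → ν')
    (h : ∀ x ∈ l, f (F x) = G x) (dA : PySem.Dict κ ν) (dB : PySem.Dict κ ν')
    (hd : dB = PySem.Dict.mk (dA.items.map (fun p => (p.1, f p.2)))) :
    (l.foldl (fun acc x => acc.insert x (G x)) dB).items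
      = (l.foldl (fun acc x => acc.insert x (F x)) dA).items.map (fun p => (p.1, f p.2)) := by
  induction l generalizing dA dB with
  | nil => simp [hd]
  | cons x l ih =>
    rw [List.foldl_cons, List.foldl_cons]
    refine ih (fun y hy => h y (List.mem_cons_of_mem _ hy)) _ _ ?_
    rw [hd, ← h x (List.mem_cons_self), pv_insert_mapVal]

theorem pv_attrtarget_aux (cs : List String) (s : PySem.Set String) :
    cs.foldl (fun d c => d.insert c (0 : Int)) (PySem.Dict.mk (s.map (fun c => (c, (0 : Int)))))
      = PySem.Dict.mk ((PySem.Set.update s cs).map (fun c => (c, (0 : Int)))) := by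
  induction cs generalizing s with
  | nil => simp [PySem.Set.update]
  | cons c rest ih =>
    rw [List.foldl_cons, PySem.Set.update_cons]
    have hstep : (PySem.Dict.mk (s.map (fun c => (c, (0 : Int))))).insert c 0
        = PySem.Dict.mk ((s.add c).map (fun c => (c, (0 : Int)))) := by
      apply PySem.Dict.ext
      rw [PySem.Set.add_eq_ite]
      by_cases h : c ∈ s
      · have hcont : (PySem.Dict.mk (s.map (fun c => (c, (0 : Int))))).contains c = true :=
          (pv_contains_mkmap s _ c).mpr h
        simp only [PySem.Dict.items_insert, hcont, if_pos, h, List.map_map]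
        apply List.map_congr_left
        intro x _
        by_cases hx : (x == c) = true <;> simp_all
      · have hcont : (PySem.Dict.mk (s.map (fun c => (c, (0 : Int))))).contains c = false := by
          rw [Bool.eq_false_iff]
          intro hh; exact h ((pv_contains_mkmap s _ c).mp hh)
        simp [PySem.Dict.items_insert, hcont, h]
    rw [hstep, ih]

theorem pv_attrtarget_eq (target : List (List String)) :
    target.foldl (fun d row => d.insert (row.headD "") (0 : Int)) PySem.Dict.empty
      = PySem.Dict.mk ((PySem.Set.ofList (target.map (fun r => r.headD ""))).map (fun c => (c, (0 : Int)))) := by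
  have := pv_attrtarget_aux (target.map (fun r => r.headD "")) []
  rw [List.foldl_map] at this
  rw [← PySem.Set.update_nil_left]
  exact this

theorem pv_range_zip {α β γ : Type} (xs : List α) (ys : List β) (dx : α) (dy : β)
    (hlen : xs.length ≤ ys.length) (st : γ → α → β → γ) (a0 : γ) :
    (List.range xs.length).foldl (fun a i => st a (xs.getD i dx) (ys.getD i dy)) a0
      = (xs.zip ys).foldl (fun a p => st a p.1 p.2) a0 := by
  induction xs generalizing ys a0 with
  | nil => simp
  | cons x xs ih =>
    cases ys with
    | nil => simp at hlen
    | cons y ys =>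
      rw [List.length_cons, List.range_succ_eq_map, List.foldl_cons, List.foldl_map]
      simp only [List.getD_cons_zero, List.getD_cons_succ, Nat.succ_eq_add_one]
      rw [List.zip_cons_cons, List.foldl_cons]
      exact ih ys (Nat.le_of_succ_le_succ hlen) (st a0 x y)

theorem pv_minfold (rs : List (List String)) (a : Nat) :
    rs.foldl (fun m t => min m t.length) a ≤ a ∧
      ∀ t ∈ rs, rs.foldl (fun m t => min m t.length) a ≤ t.length := by
  induction rs generalizing a with
  | nil => simp
  | cons r rs ih =>
    obtain ⟨h1, h2⟩ := ih (min a r.length)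
    refine ⟨le_trans h1 (min_le_left _ _), ?_⟩
    intro t ht
    rcases List.mem_cons.mp ht with rfl | ht
    · exact le_trans h1 (min_le_right _ _)
    · exact h2 t ht

theorem pv_col_len (data : List (List String)) (col : List String) (hc : col ∈ pyZipStar data) :
    col.length = data.length ∧ data ≠ [] ∧ ∀ r ∈ data, r ≠ [] := by
  match data with
  | [] => simp [pyZipStar] at hc
  | r :: rs =>
    simp only [pyZipStar, List.mem_map, List.mem_range] at hc
    obtain ⟨i, hi, rfl⟩ := hc
    refine ⟨by simp, by simp, ?_⟩
    intro t ht
    have := (pv_minfold rs r.length).2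
    have hle : rs.foldl (fun m t => min m t.length) r.length ≤ t.length := by
      rcases List.mem_cons.mp ht with rfl | ht'
      · exact (pv_minfold rs t.length).1
      · exact this t ht'
    have : 0 < t.length := lt_of_lt_of_le (Nat.lt_of_le_of_lt (Nat.zero_le i) hi) hle
    exact List.ne_nil_of_length_pos this

theorem pv_getD_classes (target : List (List String)) (k : Nat) :
    (target.map (fun r => r.headD "")).getD k "" = (target.getD k []).headD "" := by
  induction target generalizing k with
  | nil => simp
  | cons r rs ih => cases k with
    | zero => simp
    | succ k => simpa using ih k

-- ===== VERDICT (by name: the statement is the Claim_ definition above) =====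
theorem attribute_table_spec : Claim_equal_attribute_table := by
  intro data target _ hpre
  obtain ⟨hrows, hdisj⟩ := hpre
  unfold Spec_attribute_table attribute_table attribute_table_alt
  dsimp only
  rw [pv_attrtarget_eq target]
  refine Eq.symm (pv_outer (fun a : PySem.Dict String (PySem.Dict String Int) => a.items.map (fun q => (q.1, q.2.items)))
    (pyZipStar data) _ _ ?_ PySem.Dict.empty PySem.Dict.empty rfl)
  intro col hc
  obtain ⟨hlen, hdne, hrne⟩ := pv_col_len data col hc
  have hdt : data.length ≤ target.length := by
    rcases hdisj with h | ⟨r, hr, hre⟩ | h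
    · exact absurd h hdne
    · exact absurd hre (hrne r hr)
    · exact h
  have hcl : col.length ≤ (target.map (fun r => r.headD "")).length := by
    rw [List.length_map, hlen]; exact hdt
  have hA : (PySem.List.pyRange 0 col.length 1).foldl (fun attrins i =>
        (if attrins.contains (PySem.List.pyGetD col i "") then attrins
         else attrins.insert (PySem.List.pyGetD col i "")
           (PySem.Dict.mk ((PySem.Set.ofList (target.map (fun r => r.headD ""))).map (fun c => (c, (0 : Int)))))).modify
          (PySem.List.pyGetD col i "") PySem.Dict.empty
          (fun d => d.modify ((PySem.List.pyGetD target i []).headD "") 0 (· + 1))) PySem.Dict.empty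
      = (col.zip (target.map (fun r => r.headD ""))).foldl (fun a p =>
        (if a.contains p.1 then a
         else a.insert p.1
           (PySem.Dict.mk ((PySem.Set.ofList (target.map (fun r => r.headD ""))).map (fun c => (c, (0 : Int)))))).modify
          p.1 PySem.Dict.empty (fun d => d.modify p.2 0 (· + 1))) PySem.Dict.empty := by
    rw [PySem.List.pyRange_one]
    have h0 : ((col.length : Int) - 0).toNat = col.length := by simp
    rw [h0, List.foldl_map]
    simp only [zero_add, PySem.List.pyGetD_natCast, ← pv_getD_classes]
    exact pv_range_zip col (target.map (fun r => r.headD "")) "" "" hcl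
      (fun a v c => (if a.contains v then a
         else a.insert v
           (PySem.Dict.mk ((PySem.Set.ofList (target.map (fun r => r.headD ""))).map (fun c => (c, (0 : Int)))))).modify
          v PySem.Dict.empty (fun d => d.modify c 0 (· + 1))) PySem.Dict.empty
  rw [hA, pv_inner_eq (PySem.Set.ofList (target.map (fun r => r.headD "")))
    (col.zip (target.map (fun r => r.headD "")))
    (fun p hp => (PySem.Set.mem_ofList _ _).mpr (List.of_mem_zip hp).2)]
  unfold pvTable
  have hfst : (col.zip (target.map (fun r => r.headD ""))).map Prod.fst = col :=
    List.map_fst_zip hcl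
  rw [hfst]
  simp [List.map_map, PySem.List.count_eq]
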